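-- pv_equiv track=rewrite | github.com/openstack-archive/networking-brocade | networking_brocade/vyatta/vrouter/client.py | _get_config_block
-- ===== SOURCE A (Python) =====
-- def _get_config_block(input_str, search_str):
--
--     if search_str is not None:
--         index = search_str.find(input_str)
--         if index >= 0:
--             block_start = search_str[index + len(input_str):]
--             block_str = []
--             for line in block_start.split('\n'):
--                 if line.startswith('}'):
--                     break
--                 block_str.append(line)
--             return ''.join(block_str)
--
--     return None
-- ===== SOURCE B (Python) =====
-- def _get_config_block(input_str, search_str):
--
--     if search_str is not None:
--         index = search_str.find(input_str)
--         if index >= 0: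
--             block_start = search_str[index + len(input_str):]
--             if block_start.startswith('}'):
--                 return ''
--             idx = block_start.find('\n}')
--             prefix = block_start if idx < 0 else block_start[:idx]
--             return prefix.replace('\n', '')
--
--     return None
-- ===== Notes on version B (the rewrite author's own statement) =====
-- stated objective: alternative
-- what changed: Replaces the split('\n') + accumulate-until-'}' loop + join with a single substring search for '\n}' followed by one slice and a '\n'-stripping replace, never materialising the line list.
import Mathlib
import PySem

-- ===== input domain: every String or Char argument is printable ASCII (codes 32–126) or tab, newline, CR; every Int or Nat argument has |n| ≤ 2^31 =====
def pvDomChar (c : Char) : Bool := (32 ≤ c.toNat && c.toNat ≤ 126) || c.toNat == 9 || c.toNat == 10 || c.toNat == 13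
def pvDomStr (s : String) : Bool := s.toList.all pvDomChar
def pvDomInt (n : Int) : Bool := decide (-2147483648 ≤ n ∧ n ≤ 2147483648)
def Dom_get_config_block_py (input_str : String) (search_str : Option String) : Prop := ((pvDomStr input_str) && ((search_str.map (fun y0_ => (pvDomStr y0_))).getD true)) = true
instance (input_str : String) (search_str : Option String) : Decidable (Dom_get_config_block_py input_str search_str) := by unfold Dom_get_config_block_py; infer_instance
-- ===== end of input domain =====

-- B replaces A's split('\n')/accumulate-until-'}'/join loop by one find of "\n}", a slice and a
-- '\n'-stripping replace (objective: alternative decomposition, same cost).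

-- ===== PORT A =====
-- the for-loop over block_start.split('\n') with break and append
def getCfgLoopA : List String → List String → List String
  | [], acc => acc
  | line :: rest, acc =>
      if PySem.Str.startswith line "}" then acc else getCfgLoopA rest (acc ++ [line])

def get_config_block_py (input_str : String) (search_str : Option String) : Option String :=
  match search_str with
  | some s =>
      let index := PySem.Str.find s input_str
      if index ≥ 0 then
        let block_start := PySem.Str.slice s (some (index + PySem.Str.len input_str)) none
        let lines := (PySem.Str.split? block_start "\n").getD []
        some (PySem.Str.join "" (getCfgLoopA lines []))
      else none
  | none => none

-- ===== PORT B =====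
def get_config_block_py_alt (input_str : String) (search_str : Option String) : Option String :=
  match search_str with
  | some s =>
      let index := PySem.Str.find s input_str
      if index ≥ 0 then
        let block_start := PySem.Str.slice s (some (index + PySem.Str.len input_str)) none
        if PySem.Str.startswith block_start "}" then some "" else
          let idx := PySem.Str.find block_start "\n}"
          let pre := if idx < 0 then block_start else PySem.Str.slice block_start none (some idx)
          some (PySem.Str.replace pre "\n" "")
      else none
  | none => none

-- ===== PRECONDITION & SPEC =====
def Spec_get_config_block_py (input_str : String) (search_str : Option String) (out : Option String) : Prop := out = get_config_block_py_alt input_str search_str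
instance (input_str : String) (search_str : Option String) (out : Option String) : Decidable (Spec_get_config_block_py input_str search_str out) := by unfold Spec_get_config_block_py; infer_instance

-- ===== CLAIM (what is proved, stated in full; the proofs are below) =====
def Claim_equal_get_config_block_py : Prop := ∀ (input_str : String) (search_str : Option String), Dom_get_config_block_py input_str search_str → Spec_get_config_block_py input_str search_str (get_config_block_py input_str search_str)

-- ===== LEMMAS AND PROOFS =====

-- first line of each split piece, prepended with `pre`
def consFirst (pre : List Char) : List (List Char) → List (List Char)
  | [] => [pre]
  | l :: ls => (pre ++ l) :: ls

-- s.split('\n') as a plain structural recursion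
def splitNl : List Char → List (List Char)
  | [] => [[]]
  | c :: t => if c = '\n' then [] :: splitNl t else consFirst [c] (splitNl t)

-- the common specification: emit chars, dropping '\n', stopping at a '}' that opens a line
def specCfg : Bool → List Char → List Char
  | _, [] => []
  | start, c :: t =>
      if start && c == '}' then [] else
      if c == '\n' then specCfg true t else c :: specCfg false t

lemma splitNl_ne_nil (cs : List Char) : splitNl cs ≠ [] := by
  cases cs with
  | nil => simp [splitNl]
  | cons c t =>
      simp only [splitNl]
      split
      · simp
      · cases h : splitNl t <;> simp [consFirst]

lemma consFirst_nil_of_ne {xs : List (List Char)} (h : xs ≠ []) : consFirst [] xs = xs := by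
  cases xs with
  | nil => exact absurd rfl h
  | cons l ls => simp [consFirst]

lemma consFirst_consFirst (a b : List Char) (xs : List (List Char)) :
    consFirst a (consFirst b xs) = consFirst (a ++ b) xs := by
  cases xs <;> simp [consFirst]

lemma splitOn_go_eq : ∀ (fuel : Nat) (l cur : List Char) (acc : List (List Char)), l.length ≤ fuel →
    PySem.Chars.splitOn.go ['\n'] fuel l cur acc = acc.reverse ++ consFirst cur.reverse (splitNl l) := by
  intro fuel
  induction fuel with
  | zero =>
      intro l cur acc hl
      have : l = [] := by cases l <;> simp_all
      subst this
      rw [PySem.Chars.splitOn.go.eq_def]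
      simp [splitNl, consFirst]
  | succ f ih =>
      intro l cur acc hl
      cases l with
      | nil =>
          rw [PySem.Chars.splitOn.go.eq_def]
          simp [splitNl, consFirst]
      | cons c t =>
          by_cases hc : c = '\n'
          · subst hc
            have hpre : (['\n'] : List Char).isPrefixOf ('\n' :: t) = true := by
              simp [List.isPrefixOf]
            rw [PySem.Chars.splitOn.go.eq_def]
            simp only [hpre, if_pos]
            rw [ih _ _ _ (by simpa using Nat.le_of_succ_le_succ hl)]
            simp only [List.reverse_nil]
            rw [show List.drop (['\n'] : List Char).length ('\n' :: t) = t from rfl]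
            rw [consFirst_nil_of_ne (splitNl_ne_nil t)]
            simp [splitNl, consFirst]
          · have hpre : (['\n'] : List Char).isPrefixOf (c :: t) = false := by
              simp [List.isPrefixOf]
              intro h; exact absurd h.symm hc
            rw [PySem.Chars.splitOn.go.eq_def]
            simp only [hpre, Bool.false_eq_true, if_neg, not_false_iff]
            rw [ih _ _ _ (by simpa using Nat.le_of_succ_le_succ hl)]
            simp [splitNl, hc, consFirst_consFirst]

lemma splitOn_eq_splitNl (cs : List Char) : PySem.Chars.splitOn cs ['\n'] = splitNl cs := by
  unfold PySem.Chars.splitOn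
  rw [splitOn_go_eq (cs.length + 1) cs [] [] (Nat.le_succ _)]
  simp [consFirst_nil_of_ne (splitNl_ne_nil cs)]

-- the loop of port A is takeWhile over the split lines
lemma getCfgLoopA_eq : ∀ (ls acc : List String),
    List.map String.toList (getCfgLoopA ls acc) =
      List.map String.toList acc ++
        List.takeWhile (fun l => !PySem.Chars.startswith l ['}']) (ls.map String.toList) := by
  intro ls
  induction ls with
  | nil => intro acc; simp [getCfgLoopA]
  | cons line rest ih =>
      intro acc
      simp only [getCfgLoopA]
      have hsw : PySem.Str.startswith line "}" = PySem.Chars.startswith line.toList ['}'] := by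
        simp [PySem.Str.startswith_eq]
      by_cases h : PySem.Chars.startswith line.toList ['}'] = true
      · simp [hsw, h, List.takeWhile]
      · have h' : PySem.Chars.startswith line.toList ['}'] = false := by
          cases hx : PySem.Chars.startswith line.toList ['}'] <;> simp_all
        rw [if_neg (by simp [hsw, h']), ih]
        rw [List.map_cons, List.takeWhile_cons]
        simp [h']

lemma join_nil_eq_flatten (parts : List (List Char)) :
    PySem.Chars.join [] parts = parts.flatten := by
  induction parts with
  | nil => simp [PySem.Chars.join, List.intercalate]
  | cons p ps ih =>
      cases ps with
      | nil => simp [PySem.Chars.join, List.intercalate]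
      | cons q qs =>
          simp [PySem.Chars.join, List.intercalate] at *
          simpa using ih

lemma specCfg_true_eq (cs : List Char) :
    specCfg true cs = if ['}'].isPrefixOf cs then [] else specCfg false cs := by
  cases cs with
  | nil => simp [specCfg]
  | cons c t =>
      by_cases hc : c = '}'
      · subst hc; simp [specCfg, List.isPrefixOf]
      · have : ['}'].isPrefixOf (c :: t) = false := by
          simp [List.isPrefixOf]
          intro h; exact absurd h.symm hc
        simp [specCfg, this, hc]

-- A's joined lines equal specCfg
lemma A_core_eq : ∀ cs : List Char,
    (match splitNl cs with
      | [] => ([] : List Char)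
      | l :: ls => l ++ (List.takeWhile (fun l => !PySem.Chars.startswith l ['}']) ls).flatten)
      = specCfg false cs ∧
    (List.takeWhile (fun l => !PySem.Chars.startswith l ['}']) (splitNl cs)).flatten
      = specCfg true cs := by
  intro cs
  induction cs with
  | nil =>
      constructor
      · simp [splitNl, specCfg]
      · simp [splitNl, List.takeWhile, PySem.Chars.startswith, List.isPrefixOf, specCfg]
  | cons c t ih =>
      by_cases hc : c = '\n'
      · subst hc
        have hG : (match splitNl ('\n' :: t) with
            | [] => ([] : List Char)
            | l :: ls => l ++ (List.takeWhile (fun l => !PySem.Chars.startswith l ['}']) ls).flatten)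
            = specCfg false ('\n' :: t) := by
          rw [show splitNl ('\n' :: t) = [] :: splitNl t from by simp [splitNl]]
          simpa [specCfg] using ih.2
        refine ⟨hG, ?_⟩
        rw [specCfg_true_eq]
        have : ['}'].isPrefixOf ('\n' :: t) = false := by simp [List.isPrefixOf]
        simp only [this, Bool.false_eq_true, if_neg, not_false_iff]
        rw [show splitNl ('\n' :: t) = [] :: splitNl t from by simp [splitNl]]
        have hp : PySem.Chars.startswith ([] : List Char) ['}'] = false := by
          simp [PySem.Chars.startswith, List.isPrefixOf]
        rw [List.takeWhile_cons]
        simp only [hp, Bool.not_false, if_pos]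
        simpa [specCfg] using ih.2
      · obtain ⟨l, ls, hsp⟩ := List.exists_cons_of_ne_nil (splitNl_ne_nil t)
        have hGt := ih.1
        rw [hsp] at hGt
        have hsplit : splitNl (c :: t) = (c :: l) :: ls := by
          simp [splitNl, hc, hsp, consFirst]
        have hG : (match splitNl (c :: t) with
            | [] => ([] : List Char)
            | l' :: ls' => l' ++ (List.takeWhile (fun l => !PySem.Chars.startswith l ['}']) ls').flatten)
            = specCfg false (c :: t) := by
          rw [hsplit]
          simp only [specCfg]
          have hnl : (c == '\n') = false := by simp [hc]
          simp only [Bool.false_and, Bool.false_eq_true, if_neg, not_false_iff, hnl]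
          simpa using hGt
        refine ⟨hG, ?_⟩
        rw [specCfg_true_eq, hsplit]
        by_cases hb : c = '}'
        · subst hb
          have : PySem.Chars.startswith ('}' :: l) ['}'] = true := by
            simp [PySem.Chars.startswith, List.isPrefixOf]
          simp [List.takeWhile_cons, this, List.isPrefixOf]
        · have hpf : ['}'].isPrefixOf (c :: t) = false := by
            simp [List.isPrefixOf]
            intro h; exact absurd h.symm hb
          have hsw : PySem.Chars.startswith (c :: l) ['}'] = false := by
            simp [PySem.Chars.startswith, List.isPrefixOf]
            intro h; exact absurd h.symm hb
          simp only [hpf, Bool.false_eq_true, if_neg, not_false_iff]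
          rw [List.takeWhile_cons]
          simp only [hsw, Bool.not_false, if_pos]
          rw [← hG, hsplit]
          simp

-- find shifts: find.go at offset k
lemma findgo_shift (sub : List Char) (hs : sub ≠ []) : ∀ (t : List Char) (k : Nat),
    PySem.Chars.find.go sub t k =
      if PySem.Chars.find.go sub t 0 = -1 then -1 else PySem.Chars.find.go sub t 0 + k := by
  intro t
  induction t with
  | nil => intro k; simp [PySem.Chars.find.go, List.isEmpty_iff, hs]
  | cons c t ih =>
      intro k
      by_cases hp : sub.isPrefixOf (c :: t) = true
      · simp [PySem.Chars.find.go, hp]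
      · have h0 : PySem.Chars.find.go sub (c :: t) 0 = PySem.Chars.find.go sub t 1 := by
          simp [PySem.Chars.find.go, hp]
        have hk : PySem.Chars.find.go sub (c :: t) k = PySem.Chars.find.go sub t (k + 1) := by
          simp [PySem.Chars.find.go, hp]
        have hge : -1 ≤ PySem.Chars.find.go sub t 0 := by
          have := PySem.Chars.neg_one_le_find t sub
          simpa [PySem.Chars.find] using this
        rw [hk, h0, ih (k + 1), ih 1]
        by_cases hz : PySem.Chars.find.go sub t 0 = -1
        · simp [hz]
        · simp only [hz, if_neg, not_false_iff]
          have hne : ¬(PySem.Chars.find.go sub t 0 + ((1 : Nat) : Int) = -1) := by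
            push_cast; omega
          rw [if_neg hne]
          push_cast
          ring

lemma find_step (sub : List Char) (hs : sub ≠ []) (c : Char) (t : List Char) :
    PySem.Chars.find (c :: t) sub =
      if sub.isPrefixOf (c :: t) then 0
      else if PySem.Chars.find t sub = -1 then -1 else PySem.Chars.find t sub + 1 := by
  unfold PySem.Chars.find
  by_cases hp : sub.isPrefixOf (c :: t) = true
  · simp [PySem.Chars.find.go, hp]
  · rw [show PySem.Chars.find.go sub (c :: t) 0 = PySem.Chars.find.go sub t 1 by
      simp [PySem.Chars.find.go, hp]]
    rw [findgo_shift sub hs t 1]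
    simp [hp]

lemma find_nil_ne (sub : List Char) (hs : sub ≠ []) : PySem.Chars.find [] sub = -1 := by
  simp [PySem.Chars.find, PySem.Chars.find.go, List.isEmpty_iff, hs]

-- replace(s, "\n", "") is a filter
lemma replace_go_nl : ∀ (fuel : Nat) (l acc : List Char), l.length ≤ fuel →
    PySem.Chars.replace.go ['\n'] [] fuel l acc = acc.reverse ++ l.filter (fun c => !(c == '\n')) := by
  intro fuel
  induction fuel with
  | zero =>
      intro l acc hl
      have : l = [] := by cases l <;> simp_all
      subst this
      simp [PySem.Chars.replace.go]
  | succ f ih =>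
      intro l acc hl
      cases l with
      | nil => simp [PySem.Chars.replace.go]
      | cons c t =>
          by_cases hc : c = '\n'
          · subst hc
            have hpre : ['\n'].isPrefixOf ('\n' :: t) = true := by simp [List.isPrefixOf]
            rw [PySem.Chars.replace.go]
            simp only [hpre, if_pos]
            rw [ih _ _ (by simpa using Nat.le_of_succ_le_succ hl)]
            simp
          · have hpre : ['\n'].isPrefixOf (c :: t) = false := by
              simp [List.isPrefixOf]
              intro h; exact absurd h.symm hc
            rw [PySem.Chars.replace.go]
            simp only [hpre, Bool.false_eq_true, if_neg, not_false_iff]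
            rw [ih _ _ (by simpa using Nat.le_of_succ_le_succ hl)]
            simp [hc]

lemma replace_nl_eq_filter (cs : List Char) :
    PySem.Chars.replace cs ['\n'] [] = cs.filter (fun c => !(c == '\n')) := by
  unfold PySem.Chars.replace
  simp only [List.isEmpty_iff, reduceCtorEq, if_neg, not_false_iff]
  rw [replace_go_nl cs.length cs [] (le_refl _)]
  simp

-- B's sliced-and-stripped prefix equals specCfg false
lemma B_core_eq : ∀ cs : List Char,
    ((if PySem.Chars.find cs ['\n', '}'] < 0 then cs
      else cs.take (PySem.Chars.find cs ['\n', '}']).toNat).filter (fun c => !(c == '\n')))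
      = specCfg false cs := by
  intro cs
  induction cs with
  | nil => simp [find_nil_ne ['\n', '}'] (by simp), specCfg]
  | cons c t ih =>
      have hstep := find_step ['\n', '}'] (by simp) c t
      by_cases hp : (['\n', '}'] : List Char).isPrefixOf (c :: t) = true
      · -- c = '\n' and t starts with '}'
        obtain ⟨hc, hpt⟩ : c = '\n' ∧ ['}'].isPrefixOf t = true := by
          cases t with
          | nil => simp [List.isPrefixOf] at hp
          | cons d r =>
              simp [List.isPrefixOf] at hp
              obtain ⟨h1, h2⟩ := hp
              exact ⟨h1.symm, by simp [List.isPrefixOf, ← h2]⟩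
        subst hc
        rw [hstep]
        simp only [hp, if_pos]
        have : ¬ ((0 : Int) < 0) := by omega
        simp only [lt_irrefl, if_neg, this, Int.toNat_zero, List.take_zero, List.filter_nil]
        obtain ⟨r, hr⟩ : ∃ r, t = '}' :: r := by
          cases t with
          | nil => simp [List.isPrefixOf] at hpt
          | cons d r =>
              simp [List.isPrefixOf] at hpt
              exact ⟨r, by rw [← hpt]⟩
        simp [hr, specCfg]
      · rw [hstep]
        simp only [hp, Bool.false_eq_true, if_neg, not_false_iff]
        have hge : -1 ≤ PySem.Chars.find t ['\n', '}'] := PySem.Chars.neg_one_le_find t _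
        by_cases hz : PySem.Chars.find t ['\n', '}'] = -1
        · -- no occurrence: prefix is everything
          simp only [hz, if_pos]
          have h1 : (-1 : Int) < 0 := by omega
          simp only [h1, if_pos]
          rw [if_pos (by rw [hz]; omega)] at ih
          by_cases hc : c = '\n'
          · subst hc
            simp only [List.filter_cons, beq_self_eq_true, Bool.not_true, Bool.false_eq_true,
              if_neg, not_false_iff]
            rw [ih]
            have hpt : ['}'].isPrefixOf t = false := by
              cases t with
              | nil => simp [List.isPrefixOf]
              | cons d r =>
                  simp [List.isPrefixOf] at hp ⊢
                  exact hp
            rw [show specCfg false ('\n' :: t) = specCfg true t by simp [specCfg]]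
            rw [specCfg_true_eq, if_neg (by simp [hpt])]
          · have : (c == '\n') = false := by simp [hc]
            simp [List.filter_cons, this, specCfg, hc, ih]
        · have hge0 : 0 ≤ PySem.Chars.find t ['\n', '}'] := by omega
          have hne : ¬ (PySem.Chars.find t ['\n', '}'] + 1 < 0) := by omega
          simp only [hz, if_neg, not_false_iff, hne]
          have htn : (PySem.Chars.find t ['\n', '}'] + 1).toNat
              = (PySem.Chars.find t ['\n', '}']).toNat + 1 := by omega
          rw [htn, List.take_succ_cons]
          rw [if_neg (by omega)] at ih
          by_cases hc : c = '\n'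
          · subst hc
            simp only [List.filter_cons, beq_self_eq_true, Bool.not_true, Bool.false_eq_true,
              if_neg, not_false_iff]
            rw [ih]
            have hpt : ['}'].isPrefixOf t = false := by
              cases t with
              | nil => simp [List.isPrefixOf]
              | cons d r =>
                  simp [List.isPrefixOf] at hp ⊢
                  exact hp
            rw [show specCfg false ('\n' :: t) = specCfg true t by simp [specCfg]]
            rw [specCfg_true_eq, if_neg (by simp [hpt])]
          · have : (c == '\n') = false := by simp [hc]
            simp [List.filter_cons, this, specCfg, hc, ih]

-- the main per-block-start equality, on strings
lemma block_eq (bs : String) :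
    PySem.Str.join "" (getCfgLoopA ((PySem.Str.split? bs "\n").getD []) []) =
      (if PySem.Str.startswith bs "}" then ""
       else PySem.Str.replace
         (if PySem.Str.find bs "\n}" < 0 then bs
          else PySem.Str.slice bs none (some (PySem.Str.find bs "\n}"))) "\n" "") := by
  apply String.toList_inj.mp
  -- left side
  obtain ⟨lines, hl⟩ : ∃ lines, PySem.Str.split? bs "\n" = some lines := by
    have := PySem.Str.split?_map bs "\n"
    cases h : PySem.Str.split? bs "\n" with
    | none =>
        rw [h] at this
        simp [PySem.Chars.split?] at this
    | some lines => exact ⟨lines, rfl⟩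
  have hmap : lines.map String.toList = splitNl bs.toList := by
    have := PySem.Str.split?_map bs "\n"
    rw [hl] at this
    simp only [Option.map_some] at this
    rw [← splitOn_eq_splitNl]
    have h2 : PySem.Chars.split? bs.toList ['\n'] = some (PySem.Chars.splitOn bs.toList ['\n']) := by
      simp [PySem.Chars.split?]
    rw [show ("\n" : String).toList = ['\n'] by rfl] at this
    rw [h2] at this
    exact Option.some_injective _ this
  have hA : (PySem.Str.join "" (getCfgLoopA ((PySem.Str.split? bs "\n").getD []) [])).toList
      = specCfg true bs.toList := by
    rw [hl]
    simp only [Option.getD_some]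
    rw [PySem.Str.toList_join, getCfgLoopA_eq lines []]
    simp only [List.map_nil, List.nil_append]
    rw [hmap]
    rw [show ("" : String).toList = [] by rfl]
    rw [join_nil_eq_flatten]
    exact (A_core_eq bs.toList).2
  rw [hA]
  by_cases hsw : PySem.Str.startswith bs "}" = true
  · have hpf : ['}'].isPrefixOf bs.toList = true := by
      have := PySem.Str.startswith_eq bs "}"
      rw [hsw] at this
      simpa [PySem.Chars.startswith] using this.symm
    rw [if_pos hsw]
    rw [specCfg_true_eq, if_pos hpf]
    rfl
  · have hpf : ['}'].isPrefixOf bs.toList = false := by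
      have := PySem.Str.startswith_eq bs "}"
      simp only [hsw] at this
      simpa [PySem.Chars.startswith] using this.symm
    rw [if_neg hsw]
    rw [specCfg_true_eq, if_neg (by simp [hpf])]
    rw [PySem.Str.toList_replace]
    rw [show ("\n" : String).toList = ['\n'] by rfl, show ("" : String).toList = [] by rfl]
    rw [replace_nl_eq_filter]
    have hfind : PySem.Str.find bs "\n}" = PySem.Chars.find bs.toList ['\n', '}'] := by
      have := PySem.Str.find_eq bs "\n}"
      rw [this]; rfl
    by_cases hlt : PySem.Str.find bs "\n}" < 0
    · rw [if_pos hlt]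
      rw [← B_core_eq bs.toList, if_pos (by rw [← hfind]; exact hlt)]
    · rw [if_neg hlt]
      rw [PySem.Str.toList_slice, PySem.Chars.slice_eq_listSlice]
      rw [PySem.List.slice_to bs.toList (by omega)]
      rw [← B_core_eq bs.toList, if_neg (by rw [← hfind]; exact hlt), hfind]

-- ===== VERDICT (by name: the statement is the Claim_ definition above) =====
theorem get_config_block_py_spec : Claim_equal_get_config_block_py := by
  intro input_str search_str _
  unfold Spec_get_config_block_py get_config_block_py get_config_block_py_alt
  cases search_str with
  | none => rfl
  | some s =>
      simp only []
      by_cases hix : PySem.Str.find s input_str ≥ 0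
      · rw [if_pos hix, if_pos hix]
        by_cases hsw : PySem.Str.startswith
            (PySem.Str.slice s (some (PySem.Str.find s input_str + PySem.Str.len input_str)) none) "}" = true
        · rw [if_pos hsw]
          have := block_eq (PySem.Str.slice s (some (PySem.Str.find s input_str + PySem.Str.len input_str)) none)
          rw [if_pos hsw] at this
          rw [this]
        · rw [if_neg hsw]
          have := block_eq (PySem.Str.slice s (some (PySem.Str.find s input_str + PySem.Str.len input_str)) none)
          rw [if_neg hsw] at this
          rw [this]
      · rw [if_neg hix, if_neg hix]
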